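-- pv_equiv track=rewrite | github.com/tor1968uy/TensorTonic-Solutions | differencing/differencing.py | differencing
-- ===== SOURCE A (Python) =====
-- def differencing(series, order):
--     """
--     Apply d-th order differencing to the time series.
--     Returns: a list of numbers of length n - order.
--     """
--     # 1. Start with the original series as our working data
--     current_series = list(series)
--
--     # 2. Perform the differencing operation 'order' times
--     for _ in range(order):
--         # 3. Create a new list for this round of differences
--         # Each element is (current_element - previous_element)
--         diff_round = []
--         for i in range(1, len(current_series)):
--             delta = current_series[i] - current_series[i-1]
--             diff_round.append(delta)
--
--         # 4. Update working data for the next round (if any)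
--         current_series = diff_round
--
--     return current_series
-- ===== SOURCE B (Python) =====
-- def differencing(series, order):
--     """d-th order differencing computed directly: build the signed binomial
--     coefficient row of the d-th difference operator, then apply it to the
--     series in a single pass (exact for integer data)."""
--     n = len(series)
--     if order <= 0:
--         return list(series)
--     if order > n:
--         return []
--     d = order
--     row = [1]
--     for _ in range(d):
--         row = [(row[j - 1] if j > 0 else 0) - (row[j] if j < len(row) else 0)
--                for j in range(len(row) + 1)]
--     return [sum(row[j] * series[i + j] for j in range(d + 1)) for i in range(n - d)]
-- ===== Notes on version B (the rewrite author's own statement) =====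
-- stated objective: alternative
-- what changed: Instead of repeating a pairwise-difference pass order times, B builds the signed binomial coefficient row of the d-th difference operator once and applies it to the series in a single pass (exact over the integer domain), returning [] immediately when order exceeds the length.
import Mathlib
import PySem

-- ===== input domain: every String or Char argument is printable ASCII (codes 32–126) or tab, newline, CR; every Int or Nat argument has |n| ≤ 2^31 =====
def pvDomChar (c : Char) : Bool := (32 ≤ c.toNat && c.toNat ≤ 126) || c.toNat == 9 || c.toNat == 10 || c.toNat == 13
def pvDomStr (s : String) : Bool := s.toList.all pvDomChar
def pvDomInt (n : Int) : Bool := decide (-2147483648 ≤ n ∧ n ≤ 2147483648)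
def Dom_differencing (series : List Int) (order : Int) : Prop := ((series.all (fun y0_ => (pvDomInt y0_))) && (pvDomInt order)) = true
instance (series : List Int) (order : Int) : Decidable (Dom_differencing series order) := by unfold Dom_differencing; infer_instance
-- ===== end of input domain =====

-- B replaces A's repeated pairwise-difference passes by one application of the signed binomial
-- coefficient row of the d-th difference operator (exact on this integer domain); same result, different algorithm.

-- ===== PORT A =====
def differencing (series : List Int) (order : Int) : List Int :=
  (PySem.List.pyRange 0 order 1).foldl (fun cur _ =>
    (PySem.List.pyRange 1 cur.length 1).foldl (fun acc i =>
      acc ++ [PySem.List.pyGetD cur i 0 - PySem.List.pyGetD cur (i - 1) 0]) []) series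

-- ===== PORT B =====
-- one round of Pascal's rule on the signed coefficient row
def nextRow (c : List Int) : List Int :=
  (List.range (c.length + 1)).map (fun j =>
    (if 0 < j then c.getD (j - 1) 0 else 0) - (if j < c.length then c.getD j 0 else 0))

def differencing_alt (series : List Int) (order : Int) : List Int :=
  if order ≤ 0 then series
  else if (series.length : Int) < order then []
  else
    let d := order.toNat
    let row := (List.range d).foldl (fun r _ => nextRow r) [1]
    (List.range (series.length - d)).map (fun i =>
      (List.range (d + 1)).foldl (fun acc j => acc + row.getD j 0 * series.getD (i + j) 0) 0)

-- ===== PRECONDITION & SPEC =====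
def Spec_differencing (series : List Int) (order : Int) (out : List Int) : Prop := out = differencing_alt series order
instance (series : List Int) (order : Int) (out : List Int) : Decidable (Spec_differencing series order out) := by unfold Spec_differencing; infer_instance

-- ===== CLAIM (what is proved, stated in full; the proofs are below) =====
def Claim_equal_differencing : Prop := ∀ (series : List Int) (order : Int), Dom_differencing series order → Spec_differencing series order (differencing series order)

-- ===== LEMMAS AND PROOFS =====

-- mathematical description of one differencing round
def firstDiff (s : List Int) : List Int := (s.zip s.tail).map (fun p => p.2 - p.1)

-- A's inner index loop computes exactly one round of pairwise differences.
theorem inner_eq_firstDiff (cur : List Int) :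
    (PySem.List.pyRange 1 cur.length 1).foldl (fun acc i =>
      acc ++ [PySem.List.pyGetD cur i 0 - PySem.List.pyGetD cur (i - 1) 0]) []
    = firstDiff cur := by
  rw [PySem.List.foldl_append_singleton_eq_map, List.nil_append]
  apply List.ext_getElem
  · simp only [List.length_map, PySem.List.length_pyRange_one, firstDiff, List.length_zip,
      List.length_tail]
    omega
  · intro k h1 h2
    have hk : k < cur.length - 1 := by
      simp only [List.length_map, PySem.List.length_pyRange_one] at h1; omega
    simp only [List.getElem_map, PySem.List.getElem_pyRange_one, firstDiff, List.getElem_zip]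
    rw [show (1 : Int) + k - 1 = ((k : Nat) : Int) from by omega,
        show (1 : Int) + k = ((k + 1 : Nat) : Int) from by omega]
    simp only [PySem.List.pyGetD_natCast]
    rw [List.getD_eq_getElem _ _ (by omega), List.getD_eq_getElem _ _ (by omega),
        List.getElem_tail]

-- folding a step that ignores the element over a list is iterating it length-many times
theorem foldl_const_eq_iter {α : Type} (g : α → α) (l : List Int) (init : α) :
    l.foldl (fun s _ => g s) init = g^[l.length] init := by
  induction l generalizing init with
  | nil => rfl
  | cons x xs ih => simp [List.foldl_cons, ih, Function.iterate_succ_apply]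

theorem length_firstDiff (s : List Int) : (firstDiff s).length = s.length - 1 := by
  simp [firstDiff, List.length_zip]

theorem length_iter_firstDiff (d : Nat) (s : List Int) :
    (firstDiff^[d] s).length = s.length - d := by
  induction d generalizing s with
  | zero => simp
  | succ m ih =>
    rw [Function.iterate_succ_apply, ih, length_firstDiff]
    omega

theorem firstDiff_getD (s : List Int) (m : Nat) (hm : m + 1 < s.length) :
    (firstDiff s).getD m 0 = s.getD (m + 1) 0 - s.getD m 0 := by
  have hlen : m < (firstDiff s).length := by rw [length_firstDiff]; omega
  rw [List.getD_eq_getElem _ _ hlen, List.getD_eq_getElem _ _ (by omega),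
      List.getD_eq_getElem _ _ (by omega)]
  simp [firstDiff, List.getElem_zip, List.getElem_tail]

-- applying a coefficient row c across the series (B's one-pass shape, sums as Finset.range)
def applyRow (c s : List Int) : List Int :=
  (List.range (s.length + 1 - c.length)).map (fun i =>
    ∑ j ∈ Finset.range c.length, c.getD j 0 * s.getD (i + j) 0)

theorem nextRow_length (c : List Int) : (nextRow c).length = c.length + 1 := by
  simp [nextRow]

theorem nextRow_getD (c : List Int) (j : Nat) (hj : j < c.length + 1) :
    (nextRow c).getD j 0 = (if 0 < j then c.getD (j - 1) 0 else 0) - c.getD j 0 := by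
  rw [List.getD_eq_getElem _ _ (by rw [nextRow_length]; omega)]
  simp only [nextRow, List.getElem_map, List.getElem_range]
  by_cases h : j < c.length
  · simp [h]
  · simp [h]

theorem applyRow_one (s : List Int) : applyRow [1] s = s := by
  apply List.ext_getElem
  · simp [applyRow]
  · intro k h1 h2
    simp only [applyRow, List.getElem_map, List.getElem_range, List.length_cons,
      List.length_nil]
    simp [List.getElem?_eq_getElem h2]

theorem applyRow_nextRow (c s : List Int) (hc : c ≠ []) :
    applyRow (nextRow c) s = applyRow c (firstDiff s) := by
  have hk : 1 ≤ c.length := by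
    cases c with | nil => exact absurd rfl hc | cons a t => simp
  apply List.ext_getElem
  · simp only [applyRow, List.length_map, List.length_range, nextRow_length, length_firstDiff]
    omega
  · intro i h1 h2
    have hi : i < s.length - c.length := by
      simp only [applyRow, List.length_map, List.length_range, nextRow_length] at h1
      omega
    simp only [applyRow, List.getElem_map, List.getElem_range, nextRow_length]
    have hL : ∑ j ∈ Finset.range (c.length + 1), (nextRow c).getD j 0 * s.getD (i + j) 0
        = ∑ j ∈ Finset.range (c.length + 1),
            ((if 0 < j then c.getD (j - 1) 0 else 0) - c.getD j 0) * s.getD (i + j) 0 :=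
      Finset.sum_congr rfl (fun j hj => by rw [nextRow_getD c j (Finset.mem_range.mp hj)])
    have hR : ∑ j ∈ Finset.range c.length, c.getD j 0 * (firstDiff s).getD (i + j) 0
        = ∑ j ∈ Finset.range c.length,
            c.getD j 0 * (s.getD (i + (j + 1)) 0 - s.getD (i + j) 0) :=
      Finset.sum_congr rfl (fun j hj => by
        have hj' : j < c.length := Finset.mem_range.mp hj
        rw [firstDiff_getD s (i + j) (by omega), show i + j + 1 = i + (j + 1) from by omega])
    rw [hL, hR]
    simp only [sub_mul, mul_sub, Finset.sum_sub_distrib]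
    congr 1
    · rw [Finset.sum_range_succ' (fun j => (if 0 < j then c.getD (j - 1) 0 else 0) * s.getD (i + j) 0) c.length]
      simp [show ∀ j : Nat, 0 < j + 1 from fun j => Nat.succ_pos j]
    · rw [Finset.sum_range_succ]
      simp

theorem rowFold_length (d : Nat) :
    ((List.range d).foldl (fun r _ => nextRow r) [1]).length = d + 1 := by
  induction d with
  | zero => simp
  | succ m ih => rw [List.range_succ, List.foldl_append, List.foldl_cons, List.foldl_nil,
      nextRow_length, ih]

theorem iter_eq_applyRow (d : Nat) (s : List Int) :
    firstDiff^[d] s = applyRow ((List.range d).foldl (fun r _ => nextRow r) [1]) s := by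
  induction d generalizing s with
  | zero => simpa using (applyRow_one s).symm
  | succ m ih =>
    rw [List.range_succ, List.foldl_append, List.foldl_cons, List.foldl_nil,
        applyRow_nextRow _ s (by
          have := rowFold_length m
          intro h; rw [h] at this; simp at this),
        ← ih (firstDiff s), Function.iterate_succ_apply]

-- a left fold of additions over range is the Finset sum
theorem foldl_range_add (n : Nat) (f : Nat → Int) :
    (List.range n).foldl (fun acc j => acc + f j) 0 = ∑ j ∈ Finset.range n, f j := by
  induction n with
  | zero => simp
  | succ m ih => rw [List.range_succ, List.foldl_append, List.foldl_cons, List.foldl_nil,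
      Finset.sum_range_succ, ih]

-- A's whole loop is iterated differencing
theorem differencing_eq_iter (series : List Int) (order : Int) :
    differencing series order = firstDiff^[order.toNat] series := by
  unfold differencing
  have hstep : (fun (cur : List Int) (_ : Int) =>
      (PySem.List.pyRange 1 cur.length 1).foldl (fun acc i =>
        acc ++ [PySem.List.pyGetD cur i 0 - PySem.List.pyGetD cur (i - 1) 0]) [])
      = fun cur _ => firstDiff cur := by
    funext cur i; exact inner_eq_firstDiff cur
  rw [hstep, foldl_const_eq_iter firstDiff]
  congr 1
  simp [PySem.List.length_pyRange_one]

-- ===== VERDICT (by name: the statement is the Claim_ definition above) =====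
theorem differencing_spec : Claim_equal_differencing := by
  intro series order _
  unfold Spec_differencing differencing_alt
  rw [differencing_eq_iter]
  by_cases h0 : order ≤ 0
  · have : order.toNat = 0 := by omega
    simp [h0, this]
  · by_cases hbig : (series.length : Int) < order
    · simp only [h0, if_false, hbig, if_true]
      have : (firstDiff^[order.toNat] series).length = 0 := by
        rw [length_iter_firstDiff]; omega
      exact List.eq_nil_of_length_eq_zero this
    · simp only [h0, if_false, hbig]
      rw [iter_eq_applyRow]
      unfold applyRow
      rw [rowFold_length]
      have hlen : series.length + 1 - (order.toNat + 1) = series.length - order.toNat := by omega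
      rw [hlen]
      apply List.map_congr_left
      intro i _
      rw [foldl_range_add (order.toNat + 1)
        (fun j => ((List.range order.toNat).foldl (fun r _ => nextRow r) [1]).getD j 0 *
          series.getD (i + j) 0)]
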